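-- pv_equiv track=rewrite | github.com/libnano/libnano | libnano/util.py | at_run
-- ===== SOURCE A (Python) =====
-- def at_run(
--         seq: str,
--         run_length: int,
-- ) -> bool:
--     '''
--     Args:
--         seq: Sequence to operate on
--         run_length: maximum AT run limit
--
--     Returns:
--         ``True`` of seq has a maximum AT run length <= run_length
--
--     '''
--     lrun = 0
--     for b in seq:
--         if b in 'AT':
--             lrun += 1
--             if lrun > run_length:
--                 return False
--         else:
--             lrun = 0
--     return True
-- ===== SOURCE B (Python) =====
-- def at_run(
--         seq: str,
--         run_length: int,
-- ) -> bool: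
--     n = len(seq)
--     i = 0
--     while i < n:
--         if seq[i] in 'AT':
--             j = i
--             while j < n and seq[j] in 'AT':
--                 j += 1
--             if j - i > run_length:
--                 return False
--             i = j
--         else:
--             i += 1
--     return True
-- ===== Notes on version B (the rewrite author's own statement) =====
-- stated objective: alternative
-- what changed: B partitions the sequence into maximal AT runs (an inner scan measures each whole run, the outer loop jumps past it) and compares each run length once, instead of A's per-character counter that increments, resets and checks after every character.
import Mathlib
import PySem

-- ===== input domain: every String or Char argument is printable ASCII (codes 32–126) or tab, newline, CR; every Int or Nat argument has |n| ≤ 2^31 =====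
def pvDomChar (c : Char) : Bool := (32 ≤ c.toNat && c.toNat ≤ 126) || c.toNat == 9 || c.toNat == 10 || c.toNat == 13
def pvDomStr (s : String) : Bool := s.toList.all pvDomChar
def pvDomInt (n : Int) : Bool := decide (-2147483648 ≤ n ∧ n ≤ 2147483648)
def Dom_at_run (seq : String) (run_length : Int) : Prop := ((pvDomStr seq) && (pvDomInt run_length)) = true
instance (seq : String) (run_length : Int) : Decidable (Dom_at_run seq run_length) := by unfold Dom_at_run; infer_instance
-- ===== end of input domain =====

-- B scans maximal AT runs as discrete blocks instead of A's per-character counter; alternative decomposition, same behaviour.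


-- ===== PORT A =====
-- loop body of A: state none = "already returned False", some lrun = current run counter
def pvStepA (run_length : Int) (st : Option Int) (b : Char) : Option Int :=
  match st with
  | none => none
  | some lrun =>
    if b = 'A' || b = 'T' then
      if lrun + 1 > run_length then none else some (lrun + 1)
    else some 0

def at_run (seq : String) (run_length : Int) : Bool :=
  match seq.toList.foldl (pvStepA run_length) (some 0) with
  | none => false
  | some _ => true

-- ===== PORT B =====
-- inner while loop of B: length of the maximal AT prefix (j - i)
def pvCountAT : List Char → Nat
  | [] => 0
  | c :: rest => if c = 'A' || c = 'T' then pvCountAT rest + 1 else 0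

-- outer while loop of B, on the suffix starting at i
def pvRunsOk (run_length : Int) : List Char → Bool
  | [] => true
  | c :: rest =>
    if c = 'A' || c = 'T' then
      if (pvCountAT (c :: rest) : Int) > run_length then false
      else pvRunsOk run_length (List.drop (pvCountAT (c :: rest)) (c :: rest))
    else pvRunsOk run_length rest
termination_by l => l.length
decreasing_by
  · simp only [List.length_drop]
    have h1 : 1 ≤ pvCountAT (c :: rest) := by
      simp only [pvCountAT]; split <;> omega
    simp only [List.length_cons]; omega
  · simp

def at_run_alt (seq : String) (run_length : Int) : Bool :=
  pvRunsOk run_length seq.toList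

-- ===== PRECONDITION & SPEC =====
def Spec_at_run (seq : String) (run_length : Int) (out : Bool) : Prop := out = at_run_alt seq run_length
instance (seq : String) (run_length : Int) (out : Bool) : Decidable (Spec_at_run seq run_length out) := by unfold Spec_at_run; infer_instance

-- ===== CLAIM (what is proved, stated in full; the proofs are below) =====
def Claim_equal_at_run : Prop := ∀ (seq : String) (run_length : Int), Dom_at_run seq run_length → Spec_at_run seq run_length (at_run seq run_length)

-- ===== LEMMAS AND PROOFS =====

theorem pvFoldA_none (rl : Int) (l : List Char) :
    l.foldl (pvStepA rl) none = none := by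
  induction l with
  | nil => rfl
  | cons c t ih => simpa [pvStepA] using ih

-- crossing a block of AT characters in A's fold
theorem pvFoldA_run (rl : Int) (xs rest : List Char) (lrun : Int)
    (hAT : ∀ c ∈ xs, (c = 'A' || c = 'T') = true) :
    (xs ++ rest).foldl (pvStepA rl) (some lrun) =
      if xs ≠ [] ∧ (xs.length : Int) + lrun > rl then none
      else rest.foldl (pvStepA rl) (some (lrun + xs.length)) := by
  induction xs generalizing lrun with
  | nil => simp
  | cons c t ih =>
    have hc : (c = 'A' || c = 'T') = true := hAT c (by simp)
    by_cases hover : lrun + 1 > rl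
    · have : (c :: t ++ rest).foldl (pvStepA rl) (some lrun) = none := by
        simp [pvStepA, hc, hover, pvFoldA_none]
      rw [this]
      rw [if_pos ⟨by simp, by push_cast [List.length_cons]; omega⟩]
    · have hstep : (c :: t ++ rest).foldl (pvStepA rl) (some lrun)
          = (t ++ rest).foldl (pvStepA rl) (some (lrun + 1)) := by
        simp [pvStepA, hc, hover]
      rw [hstep, ih (lrun + 1) (fun c hc' => hAT c (by simp [hc']))]
      by_cases ht : t = []
      · subst ht
        simp only [ne_eq, not_true_eq_false, false_and, if_false, List.length_nil,
          List.length_cons, Nat.cast_zero]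
        rw [if_neg (by simp; omega)]
        norm_num
      · have hcond : (t ≠ [] ∧ (t.length : Int) + (lrun + 1) > rl) ↔
            ((c :: t ≠ []) ∧ ((c :: t).length : Int) + lrun > rl) := by
          simp [ht]; omega
        rcases Classical.em ((t.length : Int) + (lrun + 1) > rl) with h | h
        · rw [if_pos ⟨ht, h⟩, if_pos (hcond.mp ⟨ht, h⟩)]
        · rw [if_neg (by tauto), if_neg (by rw [← hcond]; tauto)]
          congr 1
          push_cast [List.length_cons]
          ring_nf

theorem pvCountAT_eq_takeWhile (l : List Char) :
    pvCountAT l = (l.takeWhile (fun c => c = 'A' || c = 'T')).length := by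
  induction l with
  | nil => rfl
  | cons c t ih =>
    simp only [pvCountAT, List.takeWhile_cons]
    cases hb : (decide (c = 'A') || decide (c = 'T')) <;> simp [ih]

theorem pvDrop_takeWhile (p : Char → Bool) (l : List Char) :
    List.drop (l.takeWhile p).length l = l.dropWhile p := by
  induction l with
  | nil => rfl
  | cons c t ih =>
    by_cases h : p c = true
    · simp [h, ih]
    · simp [h]

-- main equivalence on lists: A's fold agrees with B's run recursion
theorem pvMain (rl : Int) (l : List Char) :
    (match l.foldl (pvStepA rl) (some 0) with
      | none => false
      | some _ => true) = pvRunsOk rl l := by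
  fun_induction pvRunsOk rl l with
  | case1 => simp
  | case2 c rest hc hover =>
    -- run too long: A early-exits inside the run
    have hsplit := List.takeWhile_append_dropWhile
      (p := fun c => c = 'A' || c = 'T') (l := c :: rest)
    have hAT : ∀ x ∈ (c :: rest).takeWhile (fun c => c = 'A' || c = 'T'),
        (x = 'A' || x = 'T') = true := by
      intro x hx; simpa using List.mem_takeWhile_imp hx
    have := pvFoldA_run rl _ ((c :: rest).dropWhile (fun c => c = 'A' || c = 'T')) 0 hAT
    rw [hsplit] at this
    have hne : (c :: rest).takeWhile (fun c => c = 'A' || c = 'T') ≠ [] := by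
      simp [hc]
    rw [pvCountAT_eq_takeWhile] at hover
    rw [this, if_pos ⟨hne, by omega⟩]
  | case3 c rest hc hover ih =>
    have hsplit := List.takeWhile_append_dropWhile
      (p := fun c => c = 'A' || c = 'T') (l := c :: rest)
    have hAT : ∀ x ∈ (c :: rest).takeWhile (fun c => c = 'A' || c = 'T'),
        (x = 'A' || x = 'T') = true := by
      intro x hx; simpa using List.mem_takeWhile_imp hx
    have h1 := pvFoldA_run rl _ ((c :: rest).dropWhile (fun c => c = 'A' || c = 'T')) 0 hAT
    rw [hsplit] at h1
    rw [h1, if_neg (by rw [← pvCountAT_eq_takeWhile]; omega)]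
    have hdrop : List.drop (pvCountAT (c :: rest)) (c :: rest)
        = (c :: rest).dropWhile (fun c => c = 'A' || c = 'T') := by
      rw [pvCountAT_eq_takeWhile, pvDrop_takeWhile]
    rw [hdrop] at ih
    rw [hdrop, ← ih]
    -- the state entering the tail is reset at its first (non-AT) character,
    -- so the fold value does not depend on the carried counter
    rcases hd : (c :: rest).dropWhile (fun c => c = 'A' || c = 'T') with _ | ⟨d, ds⟩
    · simp
    · have hdAT : ¬ ((d = 'A' || d = 'T') = true) := by
        have := List.head?_dropWhile_not (p := fun c => c = 'A' || c = 'T') (l := c :: rest)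
        rw [hd] at this
        simpa using this
      simp [pvStepA, hdAT]
  | case4 c rest hc ih =>
    have : (c :: rest).foldl (pvStepA rl) (some 0) = rest.foldl (pvStepA rl) (some 0) := by
      simp [pvStepA, hc]
    rw [this, ih]

-- ===== VERDICT (by name: the statement is the Claim_ definition above) =====
theorem at_run_spec : Claim_equal_at_run := by
  intro seq rl _
  unfold Spec_at_run at_run at_run_alt
  exact pvMain rl seq.toList
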